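-- pv_equiv track=rewrite | github.com/RaphaelPB/CRVA_tool | 1-DownloadAndFormatData/CSV_NEX-GDDP-CMIP6_one_lat_lon_clean.py | information_files_in_vectors
-- ===== SOURCE A (Python) =====
-- def information_files_in_vectors(name_list):
--     variables= []
--     time_aggregations= []
--     models= []
--     scenarios= []
--     for file_name in name_list:
--         (variable, time_aggregation, model, scenario, year) = data_information(file_name)
--         # use function data_information to find information concerning the file_name
--         if variable not in variables:
--             variables.append(variable)
--         if time_aggregation not in time_aggregations:
--             time_aggregations.append(time_aggregation)
--         if model not in models:
--             models.append(model)
--         if scenario not in scenarios: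
--             scenarios.append(scenario)
--     return variables, time_aggregations,models,scenarios
--
-- def name_next_boundary(name):
--     index_before_name=name.find('_') # returns the lowest index where the character '_' was found
--     word = name[0:index_before_name] # first word in the string 'name', before the first character '_'
--     new_name = name.replace(word+'_','') # delete the word found from the string 'name'
--     return word, new_name # return, in string format, the word found (which is an information of the studied file),
--
-- def find_year(name):
--     index_before_name=name.rfind('_') # returns the highest index where the character '_' was found
--     # the last character '_' is just before the year in the string 'name'
--     # determine if the string 'name' ends with '.nc'
--     if name.endswith('.nc'):
--         # 'name' ends with '.nc'
--         name_end = 3 # the three last character of the string name will be removed to find the year of the studied file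
--     else:
--         # 'name' does not end with '.nc'
--         name_end = 0 # no character will be removed at the end of 'name' to find the year of the studied file
--     year = name[index_before_name+1:len(name)-name_end] # the year is extracted from the name of the file studied
--     # based on the index_before_name (highest index where the character '_' was found) and the suffix of 'name'
--     return year # the year in string format is returned
--
-- def data_information(name):
--     #### use of the function 'name_next_boundary': each time it is used,
--     # returns an information, and the name of the studied file without this information
--     (variable, shorten_name) = name_next_boundary(name)
--     (time_aggregation, shorten_name) = name_next_boundary(shorten_name)
--     (model, shorten_name) = name_next_boundary(shorten_name)
--     (scenario, shorten_name) = name_next_boundary(shorten_name)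
--     #### use the function 'find_year' to extract the information 'year' from the string 'shorten_name'
--     year = find_year(shorten_name)
--     # the function returns all the information of the studied file
--     return variable, time_aggregation, model, scenario, year
-- ===== SOURCE B (Python) =====
-- # B: parse each filename once into a tuple, then extract each of the four
-- # columns and dedup it head-and-filter style:
-- # emit the head, strip its later copies, repeat.  No 'seen' accumulator.
--
-- def name_next_boundary(name):
--     index_before_name = name.find('_')
--     word = name[0:index_before_name]
--     new_name = name.replace(word + '_', '')
--     return word, new_name
--
-- def find_year(name):
--     index_before_name = name.rfind('_')
--     name_end = 3 if name.endswith('.nc') else 0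
--     return name[index_before_name + 1:len(name) - name_end]
--
-- def data_information(name):
--     (variable, shorten_name) = name_next_boundary(name)
--     (time_aggregation, shorten_name) = name_next_boundary(shorten_name)
--     (model, shorten_name) = name_next_boundary(shorten_name)
--     (scenario, shorten_name) = name_next_boundary(shorten_name)
--     year = find_year(shorten_name)
--     return variable, time_aggregation, model, scenario, year
--
-- def _distinct(col):
--     # first-occurrence dedup by head-and-filter: emit the head, strip its
--     # later copies from the remainder, repeat on what is left
--     out = []
--     while col:
--         head = col[0]
--         out.append(head)
--         col = [x for x in col[1:] if x != head]
--     return out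
--
-- def information_files_in_vectors(name_list):
--     infos = [data_information(f) for f in name_list]
--     return (_distinct([t[0] for t in infos]),
--             _distinct([t[1] for t in infos]),
--             _distinct([t[2] for t in infos]),
--             _distinct([t[3] for t in infos]))
-- ===== Notes on version B (the rewrite author's own statement) =====
-- stated objective: alternative
-- what changed: A's single interleaved loop maintaining four seen-lists with membership-checked appends is replaced by a parse pass materialising all tuples followed by a head-and-filter recursive dedup of each column (keep the head, strip its later copies from the tail, recurse) with no seen-accumulator at all.
import Mathlib
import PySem

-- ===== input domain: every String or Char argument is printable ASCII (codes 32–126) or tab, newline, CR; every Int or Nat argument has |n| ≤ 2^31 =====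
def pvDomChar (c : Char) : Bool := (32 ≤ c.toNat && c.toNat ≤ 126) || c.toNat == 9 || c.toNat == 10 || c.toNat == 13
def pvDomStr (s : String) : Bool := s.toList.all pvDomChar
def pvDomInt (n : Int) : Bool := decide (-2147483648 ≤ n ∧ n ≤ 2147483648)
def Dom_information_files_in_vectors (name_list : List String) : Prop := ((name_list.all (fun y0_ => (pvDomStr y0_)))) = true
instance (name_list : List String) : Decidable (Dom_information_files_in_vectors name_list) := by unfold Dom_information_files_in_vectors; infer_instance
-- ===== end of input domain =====

-- B replaces A's interleaved loop with four seen-lists by a parse pass plus a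
-- head-and-filter recursive dedup of each column; objective: alternative decomposition.

-- ===== PORT A =====
-- shared module helpers (used by both Pythons, ported once)
def name_next_boundary (name : String) : String × String :=
  let index_before_name := PySem.Str.find name "_"
  let word := PySem.Str.slice name (some 0) (some index_before_name)
  let new_name := PySem.Str.replace name (word ++ "_") ""
  (word, new_name)

def find_year (name : String) : String :=
  let index_before_name := PySem.Str.rfind name "_"
  let name_end : Int := if PySem.Str.endswith name ".nc" then 3 else 0
  PySem.Str.slice name (some (index_before_name + 1)) (some (PySem.Str.len name - name_end))

def data_information (name : String) : String × String × String × String × String :=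
  let (variable_, shorten_name) := name_next_boundary name
  let (time_aggregation, shorten_name) := name_next_boundary shorten_name
  let (model, shorten_name) := name_next_boundary shorten_name
  let (scenario, shorten_name) := name_next_boundary shorten_name
  let year := find_year shorten_name
  (variable_, time_aggregation, model, scenario, year)

def pvStepA (st : List String × List String × List String × List String) (file_name : String) :
    List String × List String × List String × List String :=
  let (variables_, time_aggregations, models, scenarios) := st
  let (variable_, time_aggregation, model, scenario, _year) := data_information file_name
  let variables_ := if !variables_.contains variable_ then variables_ ++ [variable_] else variables_
  let time_aggregations := if !time_aggregations.contains time_aggregation then time_aggregations ++ [time_aggregation] else time_aggregations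
  let models := if !models.contains model then models ++ [model] else models
  let scenarios := if !scenarios.contains scenario then scenarios ++ [scenario] else scenarios
  (variables_, time_aggregations, models, scenarios)

def information_files_in_vectors (name_list : List String) : List String × List String × List String × List String :=
  name_list.foldl pvStepA ([], [], [], [])

-- ===== PORT B =====
-- head-and-filter recursive dedup (Source B's _distinct)
def pvDistinct : List String → List String
  | [] => []
  | x :: xs => x :: pvDistinct (xs.filter (fun y => y != x))
termination_by l => l.length
decreasing_by
  simp only [List.length_cons, List.length_unattach]
  exact Nat.lt_succ_of_le ((List.length_filter_le _ _).trans (Nat.le_of_eq List.length_attach))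

def information_files_in_vectors_alt (name_list : List String) : List String × List String × List String × List String :=
  let infos := name_list.map data_information
  (pvDistinct (infos.map (fun t => t.1)),
   pvDistinct (infos.map (fun t => t.2.1)),
   pvDistinct (infos.map (fun t => t.2.2.1)),
   pvDistinct (infos.map (fun t => t.2.2.2.1)))

-- ===== PRECONDITION & SPEC =====
def Spec_information_files_in_vectors (name_list : List String) (out : List String × List String × List String × List String) : Prop := out = information_files_in_vectors_alt name_list
instance (name_list : List String) (out : List String × List String × List String × List String) : Decidable (Spec_information_files_in_vectors name_list out) := by unfold Spec_information_files_in_vectors; infer_instance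

-- ===== CLAIM =====
def Claim_equal_information_files_in_vectors : Prop := ∀ (name_list : List String), Dom_information_files_in_vectors name_list → Spec_information_files_in_vectors name_list (information_files_in_vectors name_list)

-- ===== LEMMAS AND PROOFS =====

-- A's membership-checked append is exactly PySem.Set.add
lemma mem_append_eq_add (a : List String) (x : String) :
    (if !a.contains x then a ++ [x] else a) = PySem.Set.add a x := by
  cases h : a.contains x <;> simp_all [PySem.Set.add, PySem.Set.contains]

lemma pvStepA_eq (st : List String × List String × List String × List String) (x : String) :
    pvStepA st x =
      (PySem.Set.add st.1 (data_information x).1,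
       PySem.Set.add st.2.1 (data_information x).2.1,
       PySem.Set.add st.2.2.1 (data_information x).2.2.1,
       PySem.Set.add st.2.2.2 (data_information x).2.2.2.1) := by
  rcases st with ⟨v, t, m, sc⟩
  rcases h : data_information x with ⟨a, b, c, d, e⟩
  simp only [pvStepA, h]
  rw [mem_append_eq_add, mem_append_eq_add, mem_append_eq_add, mem_append_eq_add]

-- the fold of A with arbitrary accumulators is Set.update of each column
lemma foldA_eq (l : List String) :
    ∀ v t m s : List String,
      l.foldl pvStepA (v, t, m, s) =
      (PySem.Set.update v (l.map fun n => (data_information n).1),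
       PySem.Set.update t (l.map fun n => (data_information n).2.1),
       PySem.Set.update m (l.map fun n => (data_information n).2.2.1),
       PySem.Set.update s (l.map fun n => (data_information n).2.2.2.1)) := by
  induction l with
  | nil => intro v t m s; simp [PySem.Set.update]
  | cons x xs ih =>
    intro v t m s
    rw [List.foldl_cons, pvStepA_eq]
    simp only [List.map_cons, PySem.Set.update_cons]
    exact ih _ _ _ _

lemma add_cons_ne (acc : List String) (a y : String) (h : (y == a) = false) :
    PySem.Set.add (a :: acc) y = a :: PySem.Set.add acc y := by
  have hy : y ≠ a := by simpa using h
  by_cases hm : y ∈ acc <;> simp [PySem.Set.add, PySem.Set.contains, hy, hm]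

-- pushing a fixed head through Set.update filters its later copies out
lemma update_cons_head (xs : List String) : ∀ (acc : List String) (a : String),
    PySem.Set.update (a :: acc) xs = a :: PySem.Set.update acc (xs.filter (fun y => y != a)) := by
  induction xs with
  | nil => intro acc a; simp [PySem.Set.update]
  | cons y ys ih =>
    intro acc a
    by_cases h : y = a
    · subst h
      have h1 : PySem.Set.add (y :: acc) y = y :: acc := by
        simp [PySem.Set.add, PySem.Set.contains]
      have h2 : (y != y) = false := by simp
      rw [PySem.Set.update_cons, h1]
      simp only [List.filter_cons, h2, Bool.false_eq_true, if_false]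
      exact ih acc y
    · have hb : (y == a) = false := by simp [h]
      have hf : (y != a) = true := by simp [h]
      rw [PySem.Set.update_cons, add_cons_ne _ _ _ hb, ih, List.filter_cons]
      simp [hf, PySem.Set.update_cons]

-- Source B's recursive _distinct computes the first-occurrence dedup (A's fold from [])
lemma pvDistinct_eq_aux : ∀ (n : Nat) (xs : List String), xs.length ≤ n → pvDistinct xs = PySem.Set.update [] xs := by
  intro n
  induction n with
  | zero =>
    intro xs h
    have : xs = [] := List.eq_nil_of_length_eq_zero (Nat.le_zero.mp h)
    subst this; simp [pvDistinct, PySem.Set.update]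
  | succ n ih =>
    intro xs h
    cases xs with
    | nil => simp [pvDistinct, PySem.Set.update]
    | cons x xs =>
      have hlen : (xs.filter (fun y => y != x)).length ≤ n := by
        have := List.length_filter_le (fun y => y != x) xs
        simp at h; omega
      rw [pvDistinct, ih _ hlen, PySem.Set.update_cons]
      have hadd : PySem.Set.add ([] : List String) x = [x] := by
        simp [PySem.Set.add, PySem.Set.contains]
      rw [hadd, update_cons_head]

lemma pvDistinct_eq (xs : List String) : pvDistinct xs = PySem.Set.update [] xs :=
  pvDistinct_eq_aux xs.length xs le_rfl

-- ===== VERDICT =====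
theorem information_files_in_vectors_spec : Claim_equal_information_files_in_vectors := by
  intro name_list _
  show information_files_in_vectors name_list = information_files_in_vectors_alt name_list
  unfold information_files_in_vectors information_files_in_vectors_alt
  rw [foldA_eq]
  simp [pvDistinct_eq, List.map_map, Function.comp_def]
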